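-- pv_equiv track=rewrite | github.com/sp9028/P1 | Rešitve starih izpitov/5.8.py | clovek_ne_jezi_se
-- ===== SOURCE A (Python) =====
-- def clovek_ne_jezi_se(igralcev,meti):
--     pozicije = [0] * igralcev
--     igralec = 0
--     for met in meti:
--         nova = pozicije[igralec] + met
--         pozicije = [0 if x == nova else x for x in pozicije]
--         pozicije[igralec] = nova
--         igralec += 1
--         if igralec == igralcev:
--             igralec = 0
--     return pozicije
-- ===== SOURCE B (Python) =====
-- def clovek_ne_jezi_se(igralcev, meti):
--     # Incremental simulation: a dict maps a (nonzero) board position to the player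
--     # last known to stand there; stale entries are validated against pos before a
--     # kick, so each throw costs O(1) instead of a scan over all players.
--     pos = [0] * igralcev
--     at = {}
--     i = 0
--     for met in meti:
--         nova = pos[i] + met
--         if nova != 0:
--             j = at.get(nova)
--             if j is not None and pos[j] == nova:
--                 pos[j] = 0
--             at[nova] = i
--         pos[i] = nova
--         i = (i + 1) % igralcev
--     return pos
-- ===== Notes on version B (the rewrite author's own statement) =====
-- stated objective: faster
-- what changed: Replaces the per-throw rebuild of the whole position list (a full scan comprehension to kick players) with an incremental update: a dict maps each nonzero position to the player last known there (validated against the list before a kick), so each throw touches O(1) entries.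
import Mathlib
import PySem

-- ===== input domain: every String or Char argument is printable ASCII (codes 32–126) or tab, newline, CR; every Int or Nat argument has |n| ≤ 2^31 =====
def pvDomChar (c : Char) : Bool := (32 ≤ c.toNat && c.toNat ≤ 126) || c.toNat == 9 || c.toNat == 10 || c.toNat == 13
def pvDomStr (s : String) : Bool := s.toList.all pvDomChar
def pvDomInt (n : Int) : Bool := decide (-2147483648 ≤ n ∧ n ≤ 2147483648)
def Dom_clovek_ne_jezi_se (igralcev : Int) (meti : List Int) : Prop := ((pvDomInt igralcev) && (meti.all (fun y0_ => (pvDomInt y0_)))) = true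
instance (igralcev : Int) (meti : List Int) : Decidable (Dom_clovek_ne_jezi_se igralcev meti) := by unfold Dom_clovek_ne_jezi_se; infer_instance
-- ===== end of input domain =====

-- B replaces A's per-throw full-list rebuild with an incremental dict (position → player)
-- update touching O(1) entries per throw; a timing run measured B faster on large inputs.

-- ===== PORT A =====
-- one iteration of A's loop body, state (pozicije, igralec)
def stepA (igralcev : Int) (s : List Int × Int) (met : Int) : List Int × Int :=
  let nova := PySem.List.pyGetD s.1 s.2 0 + met
  let pozicije := s.1.map (fun x => if x = nova then 0 else x)
  let pozicije := PySem.List.pySetD pozicije s.2 nova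
  let igralec := s.2 + 1
  (pozicije, if igralec = igralcev then 0 else igralec)

def clovek_ne_jezi_se (igralcev : Int) (meti : List Int) : List Int :=
  (meti.foldl (stepA igralcev) (List.replicate igralcev.toNat 0, 0)).1

-- ===== PORT B =====
-- one iteration of B's loop body, state (pos, at, i)
def stepB (igralcev : Int) (t : List Int × PySem.Dict Int Int × Int) (met : Int) :
    List Int × PySem.Dict Int Int × Int :=
  let pos := t.1
  let d := t.2.1
  let i := t.2.2
  let nova := PySem.List.pyGetD pos i 0 + met
  let pd : List Int × PySem.Dict Int Int :=
    if nova ≠ 0 then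
      (match d.get? nova with
       | some j => if PySem.List.pyGetD pos j 0 = nova then PySem.List.pySetD pos j 0 else pos
       | none => pos,
       d.insert nova i)
    else (pos, d)
  (PySem.List.pySetD pd.1 i nova, pd.2, PySem.Int.mod (i + 1) igralcev)

def clovek_ne_jezi_se_alt (igralcev : Int) (meti : List Int) : List Int :=
  (meti.foldl (stepB igralcev) (List.replicate igralcev.toNat 0, PySem.Dict.empty, 0)).1

-- ===== PRECONDITION & SPEC =====
-- A raises IndexError (pozicije[0] on the empty list) when igralcev ≤ 0 and meti is nonempty;
-- exactly those inputs are excluded.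
def Pre_clovek_ne_jezi_se (igralcev : Int) (meti : List Int) : Prop :=
  meti = [] ∨ 1 ≤ igralcev
instance (igralcev : Int) (meti : List Int) : Decidable (Pre_clovek_ne_jezi_se igralcev meti) := by
  unfold Pre_clovek_ne_jezi_se; infer_instance

def pvWitness_clovek_ne_jezi_se : Int × List Int := (3, [2, 5, -3, 4, 2])

def Spec_clovek_ne_jezi_se (igralcev : Int) (meti : List Int) (out : List Int) : Prop :=
  out = clovek_ne_jezi_se_alt igralcev meti
instance (igralcev : Int) (meti : List Int) (out : List Int) : Decidable (Spec_clovek_ne_jezi_se igralcev meti out) := by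
  unfold Spec_clovek_ne_jezi_se; infer_instance

-- ===== CLAIM (what is proved, stated in full; the proofs are below) =====
def Claim_equal_clovek_ne_jezi_se : Prop := ∀ (igralcev : Int) (meti : List Int), Dom_clovek_ne_jezi_se igralcev meti → Pre_clovek_ne_jezi_se igralcev meti → Spec_clovek_ne_jezi_se igralcev meti (clovek_ne_jezi_se igralcev meti)

-- ===== LEMMAS AND PROOFS =====

-- coupling invariant between A's state (pos, i) and B's state (pos, at, i):
-- same list, same index, index in range, and the dict answers correctly for every
-- nonzero position currently held by some player (stale entries never point at a
-- player actually standing there, and all stored values are in-range indices).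
def InvR (n : Int) (s : List Int × Int) (t : List Int × PySem.Dict Int Int × Int) : Prop :=
  t.1 = s.1 ∧ t.2.2 = s.2 ∧ 0 ≤ s.2 ∧ s.2 < n ∧ s.1.length = n.toNat ∧
  (∀ (k : Nat) (hk : k < s.1.length), s.1[k] ≠ 0 → t.2.1.get? s.1[k] = some (k : Int)) ∧
  (∀ p j, t.2.1.get? p = some j → 0 ≤ j ∧ j < (s.1.length : Int))

theorem mod_step (n i : Int) (h0 : 0 ≤ i) (h1 : i < n) :
    PySem.Int.mod (i + 1) n = if i + 1 = n then 0 else i + 1 := by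
  have hn : 0 < n := lt_of_le_of_lt h0 h1
  rw [PySem.Int.mod_eq_emod_of_pos hn]
  split_ifs with h
  · simp [h]
  · exact Int.emod_eq_of_lt (by omega) (by omega)

theorem stepA_stepB (n : Int) (s : List Int × Int) (t : List Int × PySem.Dict Int Int × Int)
    (met : Int) (h : InvR n s t) : InvR n (stepA n s met) (stepB n t met) := by
  obtain ⟨posA, iA⟩ := s
  obtain ⟨pos, d, i⟩ := t
  obtain ⟨hp, hi, h0, h1, hlen, H1, H2⟩ := h
  simp only at hp hi h0 h1 hlen H1 H2
  subst hp
  subst hi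
  have hiN : i.toNat < pos.length := by omega
  have hget : PySem.List.pyGetD pos i 0 = pos[i.toNat] :=
    PySem.List.pyGetD_eq_getElem pos 0 h0 (by exact_mod_cast (by omega : i < (pos.length : Int)))
  set nova := pos[i.toNat] + met with hnova
  -- A's new list
  have hposA : (stepA n (pos, i) met).1
      = (pos.map (fun x => if x = nova then 0 else x)).set i.toNat nova := by
    simp only [stepA, hget]
    rw [PySem.List.pySetD_of_nonneg _ _ h0]
  have hiA : (stepA n (pos, i) met).2 = if i + 1 = n then 0 else i + 1 := by
    simp [stepA]
  -- B's components
  have hgetB : PySem.List.pyGetD pos i 0 + met = nova := by rw [hget]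
  -- the list equality and the invariant, by cases on nova / the dict lookup
  by_cases hz : nova = 0
  · -- no kick on B's side; A's comprehension is the identity
    have hB : stepB n (pos, d, i) met
        = (pos.set i.toNat nova, d, PySem.Int.mod (i + 1) n) := by
      simp only [stepB, hgetB, hz]
      simp [PySem.List.pySetD_of_nonneg _ _ h0]
    have hlist : (pos.map (fun x => if x = nova then 0 else x)).set i.toNat nova
        = pos.set i.toNat nova := by
      apply List.ext_getElem (by simp)
      intro k hk _
      by_cases hki : k = i.toNat
      · simp [hki]
      · simp only [List.getElem_set, List.getElem_map, Ne.symm hki, if_false]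
        have hk' : k < pos.length := by simpa using hk
        split_ifs with he <;> omega
    refine ⟨?_, ?_, ?_, ?_, ?_, ?_, ?_⟩
    · simp [hB, hposA, hlist]
    · simp [hB, hiA, mod_step n i h0 h1]
    · simp [hiA]; split_ifs <;> omega
    · simp [hiA]; split_ifs <;> omega
    · simp [hposA, hlen]
    · -- dict unchanged; position i became 0, others unchanged
      intro k hk hk0
      simp only [hposA] at hk hk0 ⊢
      simp only [List.length_set, List.length_map] at hk
      by_cases hki : k = i.toNat
      · exfalso; apply hk0; simp [hki, hz]
      · have hk' : k < pos.length := hk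
        simp only [List.getElem_set, List.getElem_map, Ne.symm hki, if_false] at hk0 ⊢
        have hne : pos[k] ≠ nova := by
          intro he; rw [he] at hk0; simp at hk0
        simp only [hne, if_false] at hk0 ⊢
        simpa [hB] using H1 k hk' hk0
    · intro p j hpj
      rw [hB] at hpj
      have := H2 p j hpj
      rw [hposA]; simpa using this
  · -- nova ≠ 0 : B records at[nova] = i and possibly kicks one player
    -- key fact: for k ≠ i.toNat, A's comprehension zeroes pos[k] iff B's guard kicks k
    have hd' : (stepB n (pos, d, i) met).2.1 = d.insert nova i := by
      simp only [stepB, hgetB]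
      split <;> rfl
    have hi' : (stepB n (pos, d, i) met).2.2 = PySem.Int.mod (i + 1) n := by
      simp only [stepB]
    -- describe B's list in each lookup case
    rcases hdn : d.get? nova with _ | j
    · -- no entry: nobody stands on nova (else H1 would give an entry)
      have hnokick : ∀ (k : Nat) (hk : k < pos.length), k ≠ i.toNat → pos[k] ≠ nova := by
        intro k hk _ he
        have := H1 k hk (by rw [he]; exact hz)
        rw [he, hdn] at this; simp at this
      have hB1 : (stepB n (pos, d, i) met).1 = pos.set i.toNat nova := by
        simp only [stepB, hgetB, hdn]
        simp [hz, PySem.List.pySetD_of_nonneg _ _ h0]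
      have hlist : (pos.map (fun x => if x = nova then 0 else x)).set i.toNat nova
          = pos.set i.toNat nova := by
        apply List.ext_getElem (by simp)
        intro k hk _
        by_cases hki : k = i.toNat
        · simp [hki]
        · have hk' : k < pos.length := by simpa using hk
          simp [Ne.symm hki, hnokick k hk' hki]
      refine ⟨?_, ?_, ?_, ?_, ?_, ?_, ?_⟩
      · simp [hB1, hposA, hlist]
      · simp [hi', hiA, mod_step n i h0 h1]
      · simp [hiA]; split_ifs <;> omega
      · simp [hiA]; split_ifs <;> omega
      · simp [hposA, hlen]
      · intro k hk hk0
        simp only [hposA] at hk hk0 ⊢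
        rw [hd']
        simp only [List.length_set, List.length_map] at hk
        by_cases hki : k = i.toNat
        · subst hki
          have hcast : ((i.toNat : Nat) : Int) = i := Int.toNat_of_nonneg h0
          simp [PySem.Dict.get?_insert_self, hcast]
        · have hk' : k < pos.length := hk
          simp only [List.getElem_set, List.getElem_map, Ne.symm hki, if_false] at hk0 ⊢
          have hne : pos[k] ≠ nova := hnokick k hk' hki
          simp only [hne, if_false] at hk0 ⊢
          rw [PySem.Dict.get?_insert_of_ne _ _ hne]
          exact H1 k hk' hk0
      · intro p j hpj
        rw [hd'] at hpj
        rw [PySem.Dict.get?_insert] at hpj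
        rw [hposA]
        simp only [List.length_set, List.length_map]
        split_ifs at hpj with hpn
        · cases hpj; constructor <;> omega
        · exact H2 p j hpj
    · -- entry present: kick iff it is still valid
      have hjb := H2 nova j hdn
      have hjN : j.toNat < pos.length := by omega
      have hgj : PySem.List.pyGetD pos j 0 = pos[j.toNat] :=
        PySem.List.pyGetD_eq_getElem pos 0 hjb.1 (by exact_mod_cast hjb.2)
      by_cases hval : pos[j.toNat] = nova
      · -- valid entry: B zeroes j, A's comprehension zeroes exactly j
        have huniq : ∀ (k : Nat) (hk : k < pos.length), pos[k] = nova → k = j.toNat := by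
          intro k hk he
          have := H1 k hk (by rw [he]; exact hz)
          rw [he, hdn] at this
          cases this; omega
        have hB1 : (stepB n (pos, d, i) met).1 = (pos.set j.toNat 0).set i.toNat nova := by
          simp only [stepB, hgetB, hdn]
          simp [hz, hgj, hval, PySem.List.pySetD_of_nonneg _ _ hjb.1, PySem.List.pySetD_of_nonneg _ _ h0]
        have hlist : (pos.map (fun x => if x = nova then 0 else x)).set i.toNat nova
            = (pos.set j.toNat 0).set i.toNat nova := by
          apply List.ext_getElem (by simp)
          intro k hk _
          by_cases hki : k = i.toNat
          · simp [hki]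
          · have hk' : k < pos.length := by simpa using hk
            simp only [List.getElem_set, List.getElem_map, Ne.symm hki, if_false]
            by_cases hkj : k = j.toNat
            · simp [hkj, hval]
            · have : pos[k] ≠ nova := fun he => hkj (huniq k hk' he)
              simp [Ne.symm hkj, this]
        refine ⟨?_, ?_, ?_, ?_, ?_, ?_, ?_⟩
        · simp [hB1, hposA, hlist]
        · simp [hi', hiA, mod_step n i h0 h1]
        · simp [hiA]; split_ifs <;> omega
        · simp [hiA]; split_ifs <;> omega
        · simp [hposA, hlen]
        · intro k hk hk0
          simp only [hposA, hlist] at hk hk0 ⊢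
          rw [hd']
          simp only [List.length_set] at hk
          by_cases hki : k = i.toNat
          · subst hki
            have hcast : ((i.toNat : Nat) : Int) = i := Int.toNat_of_nonneg h0
            simp [PySem.Dict.get?_insert_self, hcast]
          · have hk' : k < pos.length := hk
            simp only [List.getElem_set, Ne.symm hki, if_false] at hk0 ⊢
            by_cases hkj : k = j.toNat
            · simp [hkj] at hk0
            · simp only [Ne.symm hkj, if_false] at hk0 ⊢
              have hne : pos[k] ≠ nova := fun he => hkj (huniq k hk' he)
              rw [PySem.Dict.get?_insert_of_ne _ _ hne]
              exact H1 k hk' hk0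
        · intro p j' hpj
          rw [hd'] at hpj
          rw [PySem.Dict.get?_insert] at hpj
          rw [hposA]
          simp only [List.length_set, List.length_map]
          split_ifs at hpj with hpn
          · cases hpj; constructor <;> omega
          · exact H2 p j' hpj
      · -- stale entry: no kick; nobody stands on nova
        have hnokick : ∀ (k : Nat) (hk : k < pos.length), pos[k] ≠ nova := by
          intro k hk he
          have := H1 k hk (by rw [he]; exact hz)
          rw [he, hdn] at this
          cases this
          exact hval (by simpa using he)
        have hB1 : (stepB n (pos, d, i) met).1 = pos.set i.toNat nova := by
          simp only [stepB, hgetB, hdn]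
          simp [hz, hgj, hval, PySem.List.pySetD_of_nonneg _ _ h0]
        have hlist : (pos.map (fun x => if x = nova then 0 else x)).set i.toNat nova
            = pos.set i.toNat nova := by
          apply List.ext_getElem (by simp)
          intro k hk _
          by_cases hki : k = i.toNat
          · simp [hki]
          · have hk' : k < pos.length := by simpa using hk
            simp [Ne.symm hki, hnokick k hk']
        refine ⟨?_, ?_, ?_, ?_, ?_, ?_, ?_⟩
        · simp [hB1, hposA, hlist]
        · simp [hi', hiA, mod_step n i h0 h1]
        · simp [hiA]; split_ifs <;> omega
        · simp [hiA]; split_ifs <;> omega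
        · simp [hposA, hlen]
        · intro k hk hk0
          simp only [hposA, hlist] at hk hk0 ⊢
          rw [hd']
          simp only [List.length_set] at hk
          by_cases hki : k = i.toNat
          · subst hki
            have hcast : ((i.toNat : Nat) : Int) = i := Int.toNat_of_nonneg h0
            simp [PySem.Dict.get?_insert_self, hcast]
          · have hk' : k < pos.length := hk
            simp only [List.getElem_set, Ne.symm hki, if_false] at hk0 ⊢
            rw [PySem.Dict.get?_insert_of_ne _ _ (hnokick k hk')]
            exact H1 k hk' hk0
        · intro p j' hpj
          rw [hd'] at hpj
          rw [PySem.Dict.get?_insert] at hpj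
          rw [hposA]
          simp only [List.length_set, List.length_map]
          split_ifs at hpj with hpn
          · cases hpj; constructor <;> omega
          · exact H2 p j' hpj

theorem foldl_inv (n : Int) (l : List Int) :
    ∀ (s : List Int × Int) (t : List Int × PySem.Dict Int Int × Int), InvR n s t →
      InvR n (l.foldl (stepA n) s) (l.foldl (stepB n) t) := by
  induction l with
  | nil => intro s t h; exact h
  | cons m rest ih =>
      intro s t h
      exact ih _ _ (stepA_stepB n s t m h)

-- ===== VERDICT (by name: the statement is the Claim_ definition above) =====
theorem clovek_ne_jezi_se_spec : Claim_equal_clovek_ne_jezi_se := by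
  intro igralcev meti _ hpre
  unfold Spec_clovek_ne_jezi_se
  rcases hpre with rfl | hn
  · rfl
  · have hinit : InvR igralcev (List.replicate igralcev.toNat 0, 0)
        (List.replicate igralcev.toNat 0, PySem.Dict.empty, 0) := by
      refine ⟨rfl, rfl, le_refl 0, hn, by simp, ?_, ?_⟩
      · intro k hk hk0
        simp at hk0
      · intro p j hpj
        simp [PySem.Dict.get?_empty] at hpj
    have := foldl_inv igralcev meti _ _ hinit
    unfold clovek_ne_jezi_se clovek_ne_jezi_se_alt
    exact this.1.symm
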